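-- pv_equiv track=rewrite | github.com/sachinagada/CS-112---Fundamentals-of-Programming-and-Computer-Science | HW 6/HW 6.py | isKingsTour
-- ===== SOURCE A (Python) =====
-- def checkDuplicity2(a):
--     (rows,cols) = (len(a), len(a[0]))
--     resultset = set()
--     for row in range(rows):
--         for col in range(cols):
--             resultset.add(a[row][col]) #adds to set to see if unique element
--     if 0 in resultset:
--         return False # can't have 0's in King's Tour
--     if len(resultset) == rows*cols: #
--         return True #returns True if no duplicates
--     return False #False if there are duplicates
--
-- def isKingsTour(board):
--     (rows, cols) = (len(board), len(board[0]))
--     duplicate = checkDuplicity2(board) #checks for duplicates and 0's in list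
--     if duplicate ==False:
--         return False
--     #similar to wordSearch from class notes
--     #http://www.cs.cmu.edu/~112/notes/notes-2d-lists-examples.html
--     for row in range(rows):
--         for col in range(cols):
--             num = board[row][col]
--             if num!= (rows*cols): #to account for the largest number in list
--                 result = kingsTourFromCell(board,num,row,col)
--                 if result == False:
--                     return False
--     return True
--
-- def kingsTourFromCell(board,num,startRow,startCol):
--     for drow in [-1,0,1]: #goes in all directions from cell
--         for dcol in [-1,0,1]:
--             if drow!=0 or dcol!=0: # doesn't check the center position
--                 result = kingsTourInDirection(board,num,startRow,
--                                             startCol,drow,dcol)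
--                 if result == True:
--                     return True
--     return False
--
-- def kingsTourInDirection(board,num,startRow,startCol,drow,dcol):
--     (rows,cols) = (len(board), len(board[0]))
--     row = startRow + drow #checks the directions
--     col = startCol + dcol
--     #checks if the position on board has a number that is larger than num
--     # or that the row or col is within index
--     if row<0 or row>=rows or col<0 or col>=cols or board[row][col] != num+1:
--         return False
--     return True
-- ===== SOURCE B (Python) =====
-- def isKingsTour(board):
--     (rows, cols) = (len(board), len(board[0]))
--     pos = {}
--     for row in range(rows):
--         for col in range(cols):
--             pos[board[row][col]] = (row, col)
--     if 0 in pos or len(pos) != rows * cols: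
--         return False
--     for v, (r, c) in pos.items():
--         if v == rows * cols:
--             continue
--         q = pos.get(v + 1)
--         if q is None or abs(q[0] - r) > 1 or abs(q[1] - c) > 1:
--             return False
--     return True
-- ===== Notes on version B (the rewrite author's own statement) =====
-- stated objective: simpler
-- what changed: Replaces the per-cell scan of all 8 neighbours (three nested helper functions) with a single value->position dictionary built in one pass; duplicates/zero are rejected via the dict size and each value v != rows*cols is checked by looking up pos[v+1] and testing king-adjacency of the two positions.
import Mathlib
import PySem

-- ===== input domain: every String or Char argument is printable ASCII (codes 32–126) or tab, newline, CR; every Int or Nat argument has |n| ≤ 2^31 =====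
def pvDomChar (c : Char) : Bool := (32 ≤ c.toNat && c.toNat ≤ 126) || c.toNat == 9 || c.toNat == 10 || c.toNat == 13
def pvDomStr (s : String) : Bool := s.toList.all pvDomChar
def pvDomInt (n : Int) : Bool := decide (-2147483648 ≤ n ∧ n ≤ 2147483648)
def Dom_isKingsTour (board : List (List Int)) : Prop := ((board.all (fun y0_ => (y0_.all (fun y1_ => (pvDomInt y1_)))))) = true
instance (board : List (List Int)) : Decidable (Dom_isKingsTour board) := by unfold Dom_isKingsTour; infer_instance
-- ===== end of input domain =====

-- B replaces A's per-cell 8-neighbour scan (three helper functions) by one value→position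
-- dictionary and a single adjacency check per value — simpler, same asymptotic cost.

-- ===== PORT A =====
-- board[r][c]; every Python access is guarded in range by A's own tests or by Pre_, so a
-- defaulted lookup is exact on the admitted inputs
def pvCell (board : List (List Int)) (r c : Int) : Int :=
  PySem.List.pyGetD (PySem.List.pyGetD board r []) c 0

-- len(board[0]); board ≠ [] under Pre_, where the defaulted lookup is exact
def pvCols (board : List (List Int)) : Int := ((PySem.List.pyGetD board 0 []).length : Int)

def kingsTourInDirection (board : List (List Int)) (num startRow startCol drow dcol : Int) : Bool :=
  let rows : Int := board.length
  let cols : Int := pvCols board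
  let row := startRow + drow
  let col := startCol + dcol
  if row < 0 ∨ row ≥ rows ∨ col < 0 ∨ col ≥ cols ∨ pvCell board row col ≠ num + 1 then false
  else true

def kingsTourFromCell (board : List (List Int)) (num startRow startCol : Int) : Bool :=
  ([-1, 0, 1] : List Int).any (fun drow =>
    ([-1, 0, 1] : List Int).any (fun dcol =>
      if drow ≠ 0 ∨ dcol ≠ 0 then kingsTourInDirection board num startRow startCol drow dcol
      else false))

def checkDuplicity2 (a : List (List Int)) : Bool :=
  let rows : Int := a.length
  let cols : Int := pvCols a
  let resultset : PySem.Set Int :=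
    (PySem.List.pyRange 0 rows 1).foldl (fun s row =>
      (PySem.List.pyRange 0 cols 1).foldl (fun s col =>
        PySem.Set.add s (pvCell a row col)) s) PySem.Set.empty
  if resultset.contains 0 then false
  else if (PySem.Set.len resultset : Int) = rows * cols then true
  else false

def isKingsTour (board : List (List Int)) : Bool :=
  let rows : Int := board.length
  let cols : Int := pvCols board
  if checkDuplicity2 board = false then false
  else
    (PySem.List.pyRange 0 rows 1).all (fun row =>
      (PySem.List.pyRange 0 cols 1).all (fun col =>
        let num := pvCell board row col
        if num ≠ rows * cols then kingsTourFromCell board num row col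
        else true))

-- ===== PORT B =====
def isKingsTour_alt (board : List (List Int)) : Bool :=
  let rows : Int := board.length
  let cols : Int := pvCols board
  let pos : PySem.Dict Int (Int × Int) :=
    (PySem.List.pyRange 0 rows 1).foldl (fun d row =>
      (PySem.List.pyRange 0 cols 1).foldl (fun d col =>
        d.insert (pvCell board row col) (row, col)) d) PySem.Dict.empty
  if pos.contains 0 ∨ (pos.size : Int) ≠ rows * cols then false
  else
    pos.items.all (fun vp =>
      if vp.1 = rows * cols then true
      else
        match pos.get? (vp.1 + 1) with
        | none => false
        | some q => if |q.1 - vp.2.1| > 1 ∨ |q.2 - vp.2.2| > 1 then false else true)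

-- ===== PRECONDITION & SPEC =====
-- Pre_ excludes exactly the inputs on which Python A raises IndexError: the empty board
-- (len(board[0])) and ragged boards with a row shorter than the first row.
def Pre_isKingsTour (board : List (List Int)) : Prop :=
  board ≠ [] ∧ ∀ row ∈ board, (board.headI).length ≤ row.length
instance (board : List (List Int)) : Decidable (Pre_isKingsTour board) := by
  unfold Pre_isKingsTour; infer_instance

def pvWitness_isKingsTour : List (List Int) := [[1, 2], [4, 3]]

def Spec_isKingsTour (board : List (List Int)) (out : Bool) : Prop := out = isKingsTour_alt board
instance (board : List (List Int)) (out : Bool) : Decidable (Spec_isKingsTour board out) := by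
  unfold Spec_isKingsTour; infer_instance

-- ===== CLAIM (what is proved, stated in full; the proofs are below) =====
def Claim_equal_isKingsTour : Prop := ∀ (board : List (List Int)), Dom_isKingsTour board → Pre_isKingsTour board → Spec_isKingsTour board (isKingsTour board)

-- ===== LEMMAS AND PROOFS =====

-- the row-major list of coordinates both programs sweep
def pvCells (board : List (List Int)) : List (Int × Int) :=
  (PySem.List.pyRange 0 (board.length : Int) 1).flatMap (fun r =>
    (PySem.List.pyRange 0 (pvCols board) 1).map (fun c => (r, c)))

lemma mem_pvCells {board : List (List Int)} {p : Int × Int} :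
    p ∈ pvCells board ↔ 0 ≤ p.1 ∧ p.1 < (board.length : Int) ∧ 0 ≤ p.2 ∧ p.2 < pvCols board := by
  obtain ⟨r, c⟩ := p
  constructor
  · intro hp
    rw [pvCells, List.mem_flatMap] at hp
    obtain ⟨a, ha, hm⟩ := hp
    rw [List.mem_map] at hm
    obtain ⟨b, hb, he⟩ := hm
    rw [PySem.List.mem_pyRange_one] at ha hb
    injection he with h5 h6
    subst h5; subst h6
    exact ⟨ha.1, ha.2, hb.1, hb.2⟩
  · rintro ⟨h1, h2, h3, h4⟩
    rw [pvCells, List.mem_flatMap]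
    exact ⟨r, PySem.List.mem_pyRange_one.2 ⟨h1, h2⟩,
      List.mem_map.2 ⟨c, PySem.List.mem_pyRange_one.2 ⟨h3, h4⟩, rfl⟩⟩

lemma length_pvCells (board : List (List Int)) :
    ((pvCells board).length : Int) = (board.length : Int) * pvCols board := by
  simp [pvCells, List.length_flatMap, PySem.List.length_pyRange_one, pvCols,
    List.map_const', List.sum_replicate, smul_eq_mul]

-- the set A builds equals the flattened fold
lemma resultset_eq (board : List (List Int)) :
    ((PySem.List.pyRange 0 (board.length : Int) 1).foldl (fun s row =>
      (PySem.List.pyRange 0 (pvCols board) 1).foldl (fun s col =>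
        PySem.Set.add s (pvCell board row col)) s) PySem.Set.empty)
    = PySem.Set.ofList ((pvCells board).map (fun p => pvCell board p.1 p.2)) := by
  rw [PySem.Set.ofList_eq_foldl, List.foldl_map, pvCells, List.foldl_flatMap]
  simp only [List.foldl_map]
  rfl

-- the dict B builds, flattened
lemma pos_eq (board : List (List Int)) :
    ((PySem.List.pyRange 0 (board.length : Int) 1).foldl (fun d row =>
      (PySem.List.pyRange 0 (pvCols board) 1).foldl (fun d col =>
        d.insert (pvCell board row col) (row, col)) d) PySem.Dict.empty)
    = (pvCells board).foldl (fun d p => d.insert (pvCell board p.1 p.2) p) PySem.Dict.empty := by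
  rw [pvCells, List.foldl_flatMap]
  simp only [List.foldl_map]

lemma pos_keys (board : List (List Int)) :
    ((pvCells board).foldl (fun d p => d.insert (pvCell board p.1 p.2) p) PySem.Dict.empty).keys
    = PySem.Set.ofList ((pvCells board).map (fun p => pvCell board p.1 p.2)) := by
  rw [PySem.Dict.keys_foldl_insert_key]
  rw [PySem.Dict.keys_empty, PySem.Set.update_nil_left]

-- a PySem.Set is a sublist of the list it was built from
lemma foldl_add_sublist (xs : List Int) (s : PySem.Set Int) :
    (xs.foldl PySem.Set.add s).Sublist (s ++ xs) := by
  induction xs generalizing s with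
  | nil => simp
  | cons x xs ih =>
    refine (ih (PySem.Set.add s x)).trans ?_
    by_cases h : PySem.Set.contains s x
    · simp only [PySem.Set.add, h, if_pos]
      exact List.Sublist.append_left (List.sublist_cons_self x xs) s
    · simp only [PySem.Set.add, h, if_neg, Bool.false_eq_true, not_false_iff]
      simp

lemma nodup_of_ofList_length {xs : List Int} (h : (PySem.Set.ofList xs).length = xs.length) :
    xs.Nodup := by
  have hsub : (PySem.Set.ofList xs).Sublist xs := by
    rw [PySem.Set.ofList_eq_foldl]
    simpa using foldl_add_sublist xs []
  have := hsub.eq_of_length h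
  rw [← this]
  exact PySem.Set.nodup_ofList xs

lemma all_nested (rows cols : Int) (g : Int → Int → Bool) :
    (PySem.List.pyRange 0 rows 1).all (fun r =>
      (PySem.List.pyRange 0 cols 1).all (fun c => g r c))
    = ((PySem.List.pyRange 0 rows 1).flatMap (fun r =>
        (PySem.List.pyRange 0 cols 1).map (fun c => (r, c)))).all (fun p => g p.1 p.2) := by
  rw [List.all_flatMap]
  simp [List.all_map, Function.comp_def]

lemma inDirection_iff (board : List (List Int)) (num sr sc dr dc : Int) :
    kingsTourInDirection board num sr sc dr dc = true ↔
      ((sr + dr, sc + dc) ∈ pvCells board ∧ pvCell board (sr + dr) (sc + dc) = num + 1) := by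
  rw [kingsTourInDirection, mem_pvCells]
  split_ifs with h
  · simp only [false_iff]
    rintro ⟨⟨h1, h2, h3, h4⟩, h5⟩
    rcases h with h | h | h | h | h
    · omega
    · omega
    · omega
    · omega
    · exact h h5
  · push_neg at h
    simp only [true_iff]
    exact ⟨⟨by omega, by omega, by omega, by omega⟩, h.2.2.2.2⟩

lemma fromCell_iff (board : List (List Int)) (num r c : Int) :
    kingsTourFromCell board num r c = true ↔
      ∃ q, q ∈ pvCells board ∧ pvCell board q.1 q.2 = num + 1 ∧ q ≠ (r, c) ∧
        |q.1 - r| ≤ 1 ∧ |q.2 - c| ≤ 1 := by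
  rw [kingsTourFromCell]
  simp only [List.any_eq_true]
  constructor
  · rintro ⟨dr, hdr, dc, hdc, hb⟩
    by_cases hz : dr ≠ 0 ∨ dc ≠ 0
    · rw [if_pos hz] at hb
      obtain ⟨hmem, hval⟩ := (inDirection_iff board num r c dr dc).1 hb
      refine ⟨(r + dr, c + dc), hmem, hval, ?_, ?_, ?_⟩
      · intro he
        injection he with e1 e2
        rcases hz with hz | hz
        · exact hz (by omega)
        · exact hz (by omega)
      · simp only [List.mem_cons] at hdr; rcases hdr with rfl | rfl | rfl | h
        · simp
        · simp
        · simp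
        · simp at h
      · simp only [List.mem_cons] at hdc; rcases hdc with rfl | rfl | rfl | h
        · simp
        · simp
        · simp
        · simp at h
    · rw [if_neg hz] at hb
      exact absurd hb (by simp)
  · rintro ⟨⟨qr, qc⟩, hmem, hval, hne, h1, h2⟩
    simp only at h1 h2
    rw [abs_le] at h1 h2
    refine ⟨qr - r, ?_, qc - c, ?_, ?_⟩
    · have : qr - r = -1 ∨ qr - r = 0 ∨ qr - r = 1 := by omega
      rcases this with h | h | h <;> simp [h]
    · have : qc - c = -1 ∨ qc - c = 0 ∨ qc - c = 1 := by omega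
      rcases this with h | h | h <;> simp [h]
    · have hz : qr - r ≠ 0 ∨ qc - c ≠ 0 := by
        by_contra hcon
        push_neg at hcon
        exact hne (by rw [Prod.mk.injEq]; omega)
      rw [if_pos hz]
      refine (inDirection_iff board num r c (qr - r) (qc - c)).2 ?_
      have e1 : r + (qr - r) = qr := by omega
      have e2 : c + (qc - c) = qc := by omega
      rw [e1, e2]
      exact ⟨hmem, hval⟩

-- ===== VERDICT (by name: the statement is the Claim_ definition above) =====
theorem isKingsTour_spec : Claim_equal_isKingsTour := by
  intro board _ _
  unfold Spec_isKingsTour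
  rw [isKingsTour, isKingsTour_alt, checkDuplicity2]
  simp only [resultset_eq, pos_eq]
  set cells := pvCells board with hcells
  set rows : Int := (board.length : Int) with hrows
  set cols : Int := pvCols board with hcols
  set val : Int × Int → Int := fun p => pvCell board p.1 p.2 with hval
  set s : PySem.Set Int := PySem.Set.ofList (cells.map val) with hs
  set pos : PySem.Dict Int (Int × Int) :=
    cells.foldl (fun d p => d.insert (val p) p) PySem.Dict.empty with hpos
  have hkeys : pos.keys = s := pos_keys board
  have hsize : pos.size = s.length := by
    rw [← hkeys]
    simp [PySem.Dict.keys, PySem.Dict.size]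
  have hcont : pos.contains 0 = s.contains 0 := by
    rw [PySem.Dict.contains_eq_decide_mem_keys, hkeys]
    simp [PySem.Set.contains]
  have hsz : ((pos.size : Nat) : Int) = PySem.Set.len s := by
    rw [hsize]; rfl
  rw [hcont, hsz]
  by_cases h0 : s.contains 0 = true
  · rw [if_pos h0, if_pos rfl, if_pos (Or.inl h0)]
  · rw [if_neg h0]
    by_cases hn : (PySem.Set.len s = rows * cols)
    · rw [if_pos hn]
      rw [if_neg (by simp)]
      rw [if_neg (by push_neg; exact ⟨h0, hn⟩)]
      -- main case: no zeroes, no duplicates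
      have hlen : (((cells.map val).length : Nat) : Int) = rows * cols := by
        rw [List.length_map, hcells, hrows, hcols]
        exact length_pvCells board
      have hnodup : (cells.map val).Nodup := by
        refine nodup_of_ofList_length ?_
        have : ((PySem.Set.ofList (cells.map val)).length : Int)
            = ((cells.map val).length : Int) := by
          rw [← hs]
          exact hn.trans hlen.symm
        exact_mod_cast this
      have hitems : pos.items = cells.map (fun p => (val p, p)) := by
        rw [hpos]
        have := PySem.Dict.items_foldl_insert_fresh (d := PySem.Dict.empty)
          (l := cells) (k := val) (v := fun p => p)
          (by intro a _; exact PySem.Dict.contains_empty _) hnodup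
        simpa using this
      have hkeysNodup : pos.keys.Nodup := by
        rw [hkeys, hs]; exact PySem.Set.nodup_ofList _
      have hget : ∀ (w : Int) (q : Int × Int),
          pos.get? w = some q ↔ (q ∈ cells ∧ val q = w) := by
        intro w q
        rw [PySem.Dict.get?_eq_some_iff_mem_items (hnd := hkeysNodup), hitems, List.mem_map]
        constructor
        · rintro ⟨a, ha, he⟩
          injection he with e1 e2
          subst e2; subst e1
          exact ⟨ha, rfl⟩
        · rintro ⟨hq, rfl⟩
          exact ⟨q, hq, rfl⟩
      simp only [all_nested]
      have hflat : (PySem.List.pyRange 0 rows 1).flatMap (fun r =>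
          (PySem.List.pyRange 0 cols 1).map (fun c => (r, c))) = cells := by
        rw [hcells]; rfl
      rw [hflat, hitems, List.all_map]
      rw [Bool.eq_iff_iff, List.all_eq_true, List.all_eq_true]
      constructor
      · intro hall p hp
        have h1 := hall p hp
        simp only [Function.comp_apply]
        by_cases hNeq : val p = rows * cols
        · simp [hNeq]
        · rw [if_neg hNeq]
          rw [if_pos hNeq] at h1
          obtain ⟨q, hqc, hqv, hqne, ha1, ha2⟩ := (fromCell_iff board (val p) p.1 p.2).1 h1
          have hsome : pos.get? (val p + 1) = some q := (hget _ _).2 ⟨hqc, hqv⟩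
          rw [hsome]
          have hnadj : ¬(|q.1 - p.1| > 1 ∨ |q.2 - p.2| > 1) := by
            push_neg
            exact ⟨ha1, ha2⟩
          show (if |q.1 - p.1| > 1 ∨ |q.2 - p.2| > 1 then false else true) = true
          rw [if_neg hnadj]
      · intro hall p hp
        have h1 := hall p hp
        simp only [Function.comp_apply] at h1
        by_cases hNeq : val p = rows * cols
        · rw [if_neg (not_not_intro hNeq)]
        · rw [if_pos hNeq]
          rw [if_neg hNeq] at h1
          cases hq : pos.get? (val p + 1) with
          | none =>
            rw [hq] at h1
            have hfa : (false : Bool) = true := h1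
            exact absurd hfa (by simp)
          | some q =>
            rw [hq] at h1
            have h2 : (if |q.1 - p.1| > 1 ∨ |q.2 - p.2| > 1 then false else true) = true := h1
            obtain ⟨hqc, hqv⟩ := (hget _ _).1 hq
            by_cases hadj : |q.1 - p.1| > 1 ∨ |q.2 - p.2| > 1
            · rw [if_pos hadj] at h2
              exact absurd h2 (by simp)
            · push_neg at hadj
              refine (fromCell_iff board (val p) p.1 p.2).2 ⟨q, hqc, hqv, ?_, hadj.1, hadj.2⟩
              intro he
              have : val p + 1 = val p := by
                rw [← hqv, he]
              omega
    · rw [if_neg hn, if_pos rfl, if_pos (Or.inr hn)]
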